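-- pv_equiv track=rewrite | github.com/kellyhyun/cs313e | Boxes.py | nesting_boxes
-- ===== SOURCE A (Python) =====
-- def nesting_boxes (box_list):
--   max_list = []
--   max_indeces = []
--   num_sets = 0
--
--   for i in range(len(box_list)):
--     max_list.append([0, 1])
--
--   # go through each box and determine its N(i) value and the number of subsets of nested boxes it has
--   for i in range(len(box_list)):
--     each_max_list = []
--     max_list[i][0], max_list[i][1] = helper_nesting_function(box_list, i, i, max_list, each_max_list)
--
--   # determines the largest number of nested boxes
--   max_value = max(max_list, key=lambda x: x[0])[0]
--
--   # stores the index value of the boxes that have a N(i) value equal to the largest number of nested boxes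
--   for i in range(len(max_list)):
--     if max_list[i][0] == max_value:
--       max_indeces.append(i)
--
--   # adds the number of subsets of each of the box that has the largest number of nested boxes
--   for ind in max_indeces:
--     num_sets += max_list[ind][1]
--
--   return max_value, num_sets
--
-- def helper_nesting_function(box_list, box_1, box_2, max_list, each_max_list):
--   # determine maximum number of nested boxes and number of subsets when went through all boxes
--   if box_2 < 0:
--     max_num = max(each_max_list)
--     max_num_indeces = []
--     num_subsets = 0
--
--     # if the box fits none of the other boxes, return N(i) = 1 and number of subsets = 1
--     if max_num == 1:
--       return 1,1
--
--     # stores index values of the boxes that have the largest number of nested boxes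
--     for i in range(len(each_max_list)):
--       if each_max_list[i] == max_num:
--         max_num_indeces.append(box_1 - i)
--
--     for ind in max_num_indeces:
--       num_subsets += max_list[ind][1]
--
--     return max_num, num_subsets
--
--   # second box fits n the first box, then have the function run again
--   elif does_fit(box_list[box_2], box_list[box_1]):
--     each_max_list.append(max_list[box_2][0] + 1)
--     return helper_nesting_function(box_list, box_1, box_2 - 1, max_list, each_max_list)
--
--   # if the box doesn't fit then the list run through the fuction once more to the next box
--   else:
--     each_max_list.append(1)
--     return helper_nesting_function(box_list, box_1, box_2 - 1, max_list, each_max_list)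
--
-- def does_fit (box1, box2):
--   return (box1[0] < box2[0] and box1[1] < box2[1] and box1[2] < box2[2])
-- ===== SOURCE B (Python) =====
-- def nesting_boxes(box_list):
--   # iterative DP: for each box i, a single ascending scan over j < i keeps the
--   # running best chain length and the summed count of tied predecessors
--   dp = []  # dp[j] = (longest chain ending at box j, number of such chains)
--   for i in range(len(box_list)):
--     best, cnt = 1, 1
--     for j in range(i):
--       if does_fit(box_list[j], box_list[i]):
--         cand = dp[j][0] + 1
--         if cand > best:
--           best, cnt = cand, dp[j][1]
--         elif cand == best:
--           cnt += dp[j][1]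
--     dp.append((best, cnt))
--   max_value = max(length for length, _ in dp)
--   num_sets = sum(c for length, c in dp if length == max_value)
--   return max_value, num_sets
--
-- def does_fit(box1, box2):
--   return box1[0] < box2[0] and box1[1] < box2[1] and box1[2] < box2[2]
-- ===== Notes on version B (the rewrite author's own statement) =====
-- stated objective: simpler
-- what changed: A's recursive helper materializes a per-box candidate list and rescans it for the max, collects tied indices and sums their counts in separate passes; B replaces all of that with one ascending inner loop per box keeping a running (best chain length, tied-subset count) pair, which a timing run measured ~2x faster.
-- outside the precondition, e.g. on nesting_boxes([]): A raises ValueError, B raises ValueError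
import Mathlib
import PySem

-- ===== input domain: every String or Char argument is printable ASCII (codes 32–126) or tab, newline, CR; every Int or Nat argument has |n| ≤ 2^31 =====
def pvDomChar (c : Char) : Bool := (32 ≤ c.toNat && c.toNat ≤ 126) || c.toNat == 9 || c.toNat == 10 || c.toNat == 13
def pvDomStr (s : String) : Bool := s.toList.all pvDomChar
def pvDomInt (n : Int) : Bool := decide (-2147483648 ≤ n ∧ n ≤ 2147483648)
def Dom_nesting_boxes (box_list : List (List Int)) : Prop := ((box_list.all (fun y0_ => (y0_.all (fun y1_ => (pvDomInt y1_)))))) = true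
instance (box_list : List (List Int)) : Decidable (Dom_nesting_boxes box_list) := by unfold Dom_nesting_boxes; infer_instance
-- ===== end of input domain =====

-- B replaces A's recursive helper (which materializes a per-box candidate list and rescans it)
-- by a single ascending inner loop keeping a running (best length, tied count); simpler decomposition.

-- ===== PORT A =====
def pv_does_fit (box1 box2 : List Int) : Bool :=
  decide (box1.getD 0 0 < box2.getD 0 0) && decide (box1.getD 1 0 < box2.getD 1 0)
    && decide (box1.getD 2 0 < box2.getD 2 0)

-- the box_2 < 0 base branch of helper_nesting_function, kept as its own definition
def pv_base (box_1 : Int) (max_list : List (Int × Int)) (each_max_list : List Int) : Int × Int :=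
  let max_num := (PySem.List.max? each_max_list (fun x => x)).getD 1
  if max_num = 1 then (1, 1)
  else
    let max_num_indeces := (List.range each_max_list.length).foldl
      (fun acc k => if each_max_list.getD k 0 = max_num then acc ++ [box_1 - (k : Int)] else acc) []
    let num_subsets := max_num_indeces.foldl
      (fun acc ind => acc + (PySem.List.pyGetD max_list ind (0, 1)).2) 0
    (max_num, num_subsets)

def pv_helper (box_list : List (List Int)) (box_1 box_2 : Int)
    (max_list : List (Int × Int)) (each_max_list : List Int) : Int × Int :=
  if h : box_2 < 0 then pv_base box_1 max_list each_max_list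
  else if pv_does_fit (PySem.List.pyGetD box_list box_2 []) (PySem.List.pyGetD box_list box_1 []) then
    pv_helper box_list box_1 (box_2 - 1) max_list
      (each_max_list ++ [(PySem.List.pyGetD max_list box_2 (0, 1)).1 + 1])
  else
    pv_helper box_list box_1 (box_2 - 1) max_list (each_max_list ++ [1])
termination_by (box_2 + 1).toNat
decreasing_by all_goals omega

def nesting_boxes (box_list : List (List Int)) : Int × Int :=
  let max_list0 : List (Int × Int) := (List.range box_list.length).foldl (fun acc _ => acc ++ [(0, 1)]) []
  let max_list := (List.range box_list.length).foldl
    (fun ml (i : Nat) => PySem.List.pySetD ml (i : Int) (pv_helper box_list (i : Int) (i : Int) ml [])) max_list0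
  let max_value := ((PySem.List.max? max_list (fun x => x.1)).getD (0, 1)).1
  let max_indeces := (List.range max_list.length).foldl
    (fun acc (i : Nat) => if (max_list.getD i (0, 1)).1 = max_value then acc ++ [(i : Int)] else acc) ([] : List Int)
  let num_sets := max_indeces.foldl (fun acc ind => acc + (PySem.List.pyGetD max_list ind (0, 1)).2) 0
  (max_value, num_sets)

-- ===== PORT B =====
def alt_does_fit (box1 box2 : List Int) : Bool :=
  decide (box1.getD 0 0 < box2.getD 0 0) && decide (box1.getD 1 0 < box2.getD 1 0)
    && decide (box1.getD 2 0 < box2.getD 2 0)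

def alt_inner (box_list : List (List Int)) (dp : List (Int × Int)) (i : Nat) : Int × Int :=
  (List.range i).foldl
    (fun p j =>
      if alt_does_fit (box_list.getD j []) (box_list.getD i []) then
        let c := (dp.getD j (0, 0)).1 + 1
        if p.1 < c then (c, (dp.getD j (0, 0)).2)
        else if c = p.1 then (p.1, p.2 + (dp.getD j (0, 0)).2)
        else p
      else p) (1, 1)

def nesting_boxes_alt (box_list : List (List Int)) : Int × Int :=
  let dp := (List.range box_list.length).foldl (fun dp i => dp ++ [alt_inner box_list dp i]) []
  let max_value := (PySem.List.max? (dp.map Prod.fst) (fun x => x)).getD 1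
  let num_sets := ((dp.filter (fun p => p.1 = max_value)).map Prod.snd).sum
  (max_value, num_sets)

-- ===== PRECONDITION & SPEC =====
-- the comparisons of does_fit(b1, b2) read b1[0], b2[0], then (only if the previous compare was
-- true, by and-short-circuiting) b1[1], b2[1], then b1[2], b2[2]; safe = no IndexError
def pv_fit_safe (b1 b2 : List Int) : Bool :=
  1 ≤ b1.length && 1 ≤ b2.length &&
    (!(b1.getD 0 0 < b2.getD 0 0) || (2 ≤ b1.length && 2 ≤ b2.length &&
      (!(b1.getD 1 0 < b2.getD 1 0) || (3 ≤ b1.length && 3 ≤ b2.length))))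

-- Pre_ excludes exactly the inputs on which A raises: the empty list (ValueError from max([]))
-- and lists where some comparison does_fit(box_list[j], box_list[i]) with j ≤ i reads a missing
-- box coordinate (IndexError).
def Pre_nesting_boxes (box_list : List (List Int)) : Prop :=
  box_list ≠ [] ∧ ∀ i < box_list.length, ∀ j ≤ i,
    pv_fit_safe (box_list.getD j []) (box_list.getD i []) = true
instance (box_list : List (List Int)) : Decidable (Pre_nesting_boxes box_list) := by
  unfold Pre_nesting_boxes; infer_instance

def pvWitness_nesting_boxes : List (List Int) := [[1, 2, 3], [2, 3, 4]]

def Spec_nesting_boxes (box_list : List (List Int)) (out : Int × Int) : Prop := out = nesting_boxes_alt box_list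
instance (box_list : List (List Int)) (out : Int × Int) : Decidable (Spec_nesting_boxes box_list out) := by unfold Spec_nesting_boxes; infer_instance

-- ===== CLAIM (what is proved, stated in full; the proofs are below) =====
def Claim_equal_nesting_boxes : Prop := ∀ (box_list : List (List Int)), Dom_nesting_boxes box_list → Pre_nesting_boxes box_list → Spec_nesting_boxes box_list (nesting_boxes box_list)

-- ===== LEMMAS AND PROOFS =====

-- the candidate A's helper appends for scan index j while computing box i
def pvCand (bl : List (List Int)) (ml : List (Int × Int)) (i j : Nat) : Int :=
  if pv_does_fit (bl.getD j []) (bl.getD i []) then (ml.getD j (0, 1)).1 + 1 else 1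

lemma helper_eq (bl : List (List Int)) (ml : List (Int × Int)) (i : Nat) :
    ∀ (t : Nat) (E : List Int),
      pv_helper bl (i : Int) (t : Int) ml E
        = pv_base (i : Int) ml (E ++ (List.range (t + 1)).map (fun k => pvCand bl ml i (t - k))) := by
  intro t
  induction t with
  | zero =>
    intro E
    rw [pv_helper]
    simp only [Nat.cast_zero, show ¬ ((0:Int) < 0) from by omega, dite_false,
      PySem.List.pyGetD_zero, PySem.List.pyGetD_natCast, Nat.zero_sub,
      List.getD_eq_getElem?_getD]
    by_cases h : pv_does_fit (bl[0]?.getD []) (bl[i]?.getD [])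
    · rw [if_pos h, pv_helper]
      simp [pvCand, h, List.getD_eq_getElem?_getD]
    · rw [if_neg h, pv_helper]
      simp [pvCand, h, List.getD_eq_getElem?_getD]
  | succ m ih =>
    intro E
    rw [pv_helper]
    have hnn : ¬ ((m + 1 : Nat) : Int) < 0 := by push_cast; omega
    have hsub : ((m + 1 : Nat) : Int) - 1 = (m : Nat) := by push_cast; ring
    simp only [hnn, dite_false, hsub, PySem.List.pyGetD_natCast, List.getD_eq_getElem?_getD]
    have hmap : (List.range (m + 1 + 1)).map (fun k => pvCand bl ml i (m + 1 - k))
        = pvCand bl ml i (m + 1) :: (List.range (m + 1)).map (fun k => pvCand bl ml i (m - k)) := by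
      rw [List.range_succ_eq_map]
      simp [List.map_map, Function.comp_def, Nat.succ_sub_succ]
    by_cases h : pv_does_fit (bl[m + 1]?.getD []) (bl[i]?.getD [])
    · rw [if_pos h, ih, hmap]
      simp [pvCand, h, List.append_assoc, List.getD_eq_getElem?_getD]
    · rw [if_neg h, ih, hmap]
      simp [pvCand, h, List.append_assoc, List.getD_eq_getElem?_getD]
lemma foldl_max_out (l : List Int) : ∀ (a x : Int), l.foldl max (max a x) = max (l.foldl max a) x := by
  induction l with
  | nil => intro a x; simp
  | cons y t ih =>
    intro a x
    simp only [List.foldl_cons]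
    rw [show max (max a x) y = max (max a y) x by
      simp [max_comm, max_left_comm], ih]
lemma foldl_max_rev (l : List Int) : ∀ (a : Int), l.reverse.foldl max a = l.foldl max a := by
  induction l with
  | nil => intro a; simp
  | cons y t ih =>
    intro a
    simp only [List.reverse_cons, List.foldl_append, List.foldl_cons, List.foldl_nil, ih]
    rw [← foldl_max_out]
lemma map_range_sub {α : Type} (f : Nat → α) (n : Nat) :
    (List.range (n + 1)).map (fun k => f (n - k)) = ((List.range (n + 1)).map f).reverse := by
  induction n generalizing f with
  | zero => simp
  | succ m ih =>
    have hR : ((List.range (m + 1 + 1)).map f).reverse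
        = ((List.range (m + 1)).map (fun j => f (j + 1))).reverse ++ [f 0] := by
      rw [List.range_succ_eq_map]
      simp [List.map_map, Function.comp]
    have hL : (List.range (m + 1 + 1)).map (fun k => f (m + 1 - k))
        = (List.range (m + 1)).map (fun k => f (m + 1 - k)) ++ [f 0] := by
      rw [List.range_succ (n := m + 1), List.map_append]
      simp
    have h1 : (List.range (m + 1)).map (fun k => f (m + 1 - k))
        = (List.range (m + 1)).map (fun k => (fun j => f (j + 1)) (m - k)) := by
      apply List.map_congr_left
      intro k hk
      have := List.mem_range.mp hk
      congr 1
      omega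
    rw [hL, hR, h1, ih (fun j => f (j + 1))]
lemma sum_filter_map_ite (P : Nat → Bool) (w : Nat → Int) (l : List Nat) :
    ((l.filter P).map w).sum = (l.map (fun k => if P k then w k else 0)).sum := by
  induction l with
  | nil => simp
  | cons y t ih =>
    by_cases h : P y <;> simp [h, ih]
lemma le_foldl_max_int (l : List Int) : ∀ (a : Int), a ≤ l.foldl max a := by
  induction l with
  | nil => simp
  | cons y t ih => intro a; exact le_trans (le_max_left a y) (ih _)
lemma fold_inv (c w : Nat → Int) : ∀ (l : List Nat) (b cb : Int),
    l.foldl (fun p j => if p.1 < c j then (c j, w j)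
      else if c j = p.1 then (p.1, p.2 + w j) else p) (b, cb)
    = ((l.map c).foldl max b,
       (if (l.map c).foldl max b = b then cb else 0)
         + ((l.filter (fun j => c j = (l.map c).foldl max b)).map w).sum) := by
  intro l
  induction l with
  | nil => intro b cb; simp
  | cons j t ih =>
    intro b cb
    have hble : ∀ (b0 : Int), b0 ≤ (t.map c).foldl max b0 := fun b0 => le_foldl_max_int _ _
    by_cases h1 : b < c j
    · have hmax : max b (c j) = c j := by omega
      simp only [List.foldl_cons, List.map_cons, List.filter_cons, if_pos h1, hmax]
      rw [ih]
      have hM : c j ≤ (t.map c).foldl max (c j) := hble _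
      have hMb : ¬ ((t.map c).foldl max (c j) = b) := by omega
      by_cases h2 : c j = (t.map c).foldl max (c j)
      · rw [← h2]
        have hcb : ¬ (c j = b) := by omega
        simp [hcb]
      · have h2' : ¬ ((t.map c).foldl max (c j) = c j) := fun hc => h2 hc.symm
        simp [h2, h2', hMb]
    · by_cases h2 : c j = b
      · have hmax : max b (c j) = b := by omega
        simp only [List.foldl_cons, List.map_cons, List.filter_cons,
          if_neg (by omega : ¬ b < c j), if_pos h2, hmax]
        rw [ih]
        by_cases h3 : (t.map c).foldl max b = b
        · simp [h3, h2]
          ring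
        · have h4 : ¬ (c j = (t.map c).foldl max b) := by rw [h2]; exact fun hc => h3 hc.symm
          simp [h3, h4]
      · have hmax : max b (c j) = b := by omega
        simp only [List.foldl_cons, List.map_cons, List.filter_cons,
          if_neg (by omega : ¬ b < c j), if_neg h2, hmax]
        rw [ih]
        have h4 : ¬ (c j = (t.map c).foldl max b) := by
          have := hble b
          omega
        simp [h4]
lemma max_filter_ext (ft : Nat → Bool) (c : Nat → Int) (h1 : ∀ j, ft j = false → c j = 1) :
    ∀ (l : List Nat) (b : Int), 1 ≤ b →
      ((l.filter ft).map c).foldl max b = (l.map c).foldl max b := by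
  intro l
  induction l with
  | nil => intro b _; rfl
  | cons j t ih =>
    intro b hb
    by_cases h : ft j
    · simp only [List.filter_cons, h, if_pos, List.map_cons, List.foldl_cons]
      exact ih _ (le_trans hb (le_max_left _ _))
    · have hcj : c j = 1 := h1 j (by simpa using h)
      simp only [List.filter_cons, h, List.map_cons, List.foldl_cons, hcj,
        max_eq_left hb]
      exact ih _ hb
lemma main_step (bl : List (List Int)) (dp : List (Int × Int)) (rest : List (Int × Int)) (i : Nat)
    (hlen : dp.length = i) (hpos : ∀ p ∈ dp, 1 ≤ p.1) :
    pv_helper bl (i : Int) (i : Int) (dp ++ (0, 1) :: rest) [] = alt_inner bl dp i := by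
  have hself : pv_does_fit (bl.getD i []) (bl.getD i []) = false := by
    simp [pv_does_fit]
  have hcandi : pvCand bl (dp ++ (0, 1) :: rest) i i = 1 := by
    simp only [pvCand, hself, Bool.false_eq_true, if_false]
  have hdpj : ∀ j, j < i → (dp ++ (0, 1) :: rest).getD j (0, 1) = dp.getD j (0, 0) := by
    intro j hj
    rw [List.getD_append _ _ _ _ (by omega), List.getD_eq_getElem _ _ (by omega),
      List.getD_eq_getElem _ _ (by omega)]
  -- abbreviations
  set ml := dp ++ (0, 1) :: rest with hml
  set cB : Nat → Int := fun j =>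
    if alt_does_fit (bl.getD j []) (bl.getD i []) then (dp.getD j (0, 0)).1 + 1 else 1 with hcB
  set wB : Nat → Int := fun j => (dp.getD j (0, 0)).2 with hwB
  have hcand : ∀ j, j < i → pvCand bl ml i j = cB j := by
    intro j hj
    simp only [pvCand, hcB, hdpj j hj, alt_does_fit, pv_does_fit]
    rfl
  -- A side: unfold the recursion into pv_base on the reversed candidate list
  rw [helper_eq, List.nil_append, map_range_sub]
  have hsplit : (List.range (i + 1)).map (pvCand bl ml i)
      = (List.range i).map (pvCand bl ml i) ++ [1] := by
    rw [List.range_succ]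
    simp [hcandi]
  rw [hsplit]
  set C : List Int := (List.range i).map (pvCand bl ml i) with hC
  have hrev : (C ++ [1]).reverse = 1 :: C.reverse := by simp
  rw [hrev]
  have hCcB : C = (List.range i).map cB := by
    rw [hC]
    exact List.map_congr_left (fun j hj => hcand j (List.mem_range.mp hj))
  set M : Int := C.foldl max 1 with hM
  have hbase : pv_base (i : Int) ml (1 :: C.reverse)
      = (if M = 1 then ((1 : Int), (1 : Int))
         else (M, (((List.range i).filter (fun j => cB j = M)).map wB).sum)) := by
    rw [pv_base]
    simp only [PySem.List.max?_id_cons, Option.getD_some, foldl_max_rev, ← hM]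
    by_cases hM1 : M = 1
    · simp [hM1]
    · rw [if_neg hM1, if_neg hM1]
      congr 1
      -- the index loop and the summation loop
      have happ := PySem.List.foldl_append_if (fun k => decide ((1 :: C.reverse).getD k 0 = M))
        (fun k => (i : Int) - (k : Int)) (List.range (1 :: C.reverse).length) []
      simp only [decide_eq_true_eq] at happ
      rw [happ, List.nil_append, PySem.List.foldl_add, zero_add]
      have hlenE : (1 :: C.reverse).length = i + 1 := by simp [hC]
      rw [hlenE]
      have hEget : ∀ k ∈ List.range (i + 1),
          (decide ((1 :: C.reverse).getD k 0 = M)) = decide (pvCand bl ml i (i - k) = M) := by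
        intro k hk
        have hk' := List.mem_range.mp hk
        have : (1 :: C.reverse) = (List.range (i + 1)).map (fun k => pvCand bl ml i (i - k)) := by
          rw [map_range_sub, hsplit, hrev]
        rw [this, PySem.List.getD_map_range _ _ _ _ hk']
      rw [List.filter_congr hEget]
      have hmapg : ∀ k ∈ (List.range (i + 1)).filter (fun k => pvCand bl ml i (i - k) = M),
          (PySem.List.pyGetD ml ((i : Int) - (k : Int)) (0, 1)).2 = (fun k => (ml.getD (i - k) (0, 1)).2) k := by
        intro k hk
        have hk' : k < i + 1 := List.mem_range.mp (List.mem_of_mem_filter hk)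
        have : ((i : Int) - (k : Int)) = ((i - k : Nat) : Int) := by push_cast [Nat.cast_sub (by omega : k ≤ i)]; ring
        rw [this, PySem.List.pyGetD_natCast]
      rw [List.map_map]
      simp only [Function.comp_def]
      rw [List.map_congr_left hmapg]
      -- reindex k ↦ i - k
      have h1 : (((List.range (i + 1)).filter (fun k => pvCand bl ml i (i - k) = M)).map
            (fun k => (ml.getD (i - k) (0, 1)).2)).sum
          = ((List.range (i + 1)).map
              (fun k => if pvCand bl ml i (i - k) = M then (ml.getD (i - k) (0, 1)).2 else 0)).sum := by
        rw [sum_filter_map_ite (fun k => decide (pvCand bl ml i (i - k) = M))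
          (fun k => (ml.getD (i - k) (0, 1)).2)]
        congr 1
        apply List.map_congr_left
        intro k _
        by_cases h : pvCand bl ml i (i - k) = M <;> simp [h]
      rw [h1, map_range_sub (fun j => if pvCand bl ml i j = M then (ml.getD j (0, 1)).2 else 0),
        List.sum_reverse]
      have hsum := sum_filter_map_ite (fun j => decide (pvCand bl ml i j = M))
        (fun j => (ml.getD j (0, 1)).2) (List.range (i + 1))
      simp only [decide_eq_true_eq] at hsum
      rw [← hsum]
      -- drop the self entry j = i (its candidate is 1 ≠ M) and move to dp-based values
      rw [List.range_succ, List.filter_append]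
      have : (List.filter (fun j => decide (pvCand bl ml i j = M)) [i]) = [] := by
        simp [hcandi, Ne.symm, hM1]
      rw [this, List.append_nil]
      have hfc : (List.range i).filter (fun j => decide (pvCand bl ml i j = M))
          = (List.range i).filter (fun j => cB j = M) := by
        apply List.filter_congr
        intro j hj
        rw [hcand j (List.mem_range.mp hj)]
      rw [hfc]
      congr 1
      apply List.map_congr_left
      intro j hj
      have hj' : j < i := List.mem_range.mp (List.mem_of_mem_filter hj)
      simp only [hwB, hdpj j hj']
  rw [hbase]
  -- B side: filter out the non-fitting indices, then the running-max/count characterisation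
  have hB : alt_inner bl dp i
      = ((List.range i).filter (fun j => alt_does_fit (bl.getD j []) (bl.getD i []))).foldl
          (fun p j => if p.1 < (dp.getD j (0, 0)).1 + 1 then ((dp.getD j (0, 0)).1 + 1, (dp.getD j (0, 0)).2)
            else if (dp.getD j (0, 0)).1 + 1 = p.1 then (p.1, p.2 + (dp.getD j (0, 0)).2) else p)
          (1, 1) := by
    rw [alt_inner, List.foldl_filter]
  rw [hB, fold_inv (fun j => (dp.getD j (0, 0)).1 + 1) (fun j => (dp.getD j (0, 0)).2)]
  set lf := (List.range i).filter (fun j => alt_does_fit (bl.getD j []) (bl.getD i [])) with hlf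
  have hmb : (lf.map (fun j => (dp.getD j (0, 0)).1 + 1)).foldl max 1 = M := by
    have h2 : lf.map (fun j => (dp.getD j (0, 0)).1 + 1) = lf.map cB := by
      apply List.map_congr_left
      intro j hj
      have := List.of_mem_filter hj
      simp only [hcB, this, if_pos]
    rw [h2, hlf, max_filter_ext (fun j => alt_does_fit (bl.getD j []) (bl.getD i [])) cB
      (by intro j hjf
          have hjf' : alt_does_fit (bl.getD j []) (bl.getD i []) = false := hjf
          simp only [hcB, hjf', Bool.false_eq_true, if_false]) _ _ (by omega), ← hCcB, ← hM]
  rw [hmb]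
  have hge2 : ∀ j ∈ lf, 2 ≤ (dp.getD j (0, 0)).1 + 1 := by
    intro j hj
    have hj' : j < i := List.mem_range.mp (List.mem_of_mem_filter hj)
    have hmem : dp.getD j (0, 0) ∈ dp := by
      rw [List.getD_eq_getElem _ _ (by omega)]
      exact List.getElem_mem _
    have := hpos _ hmem
    omega
  by_cases hM1 : M = 1
  · rw [if_pos hM1, hM1]
    have hnil : lf.filter (fun j => (dp.getD j (0, 0)).1 + 1 = (1 : Int)) = [] := by
      rw [List.filter_eq_nil_iff]
      intro j hj
      have := hge2 j hj
      simp only [decide_eq_true_eq]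
      omega
    rw [hnil]
    simp
  · simp only [if_neg hM1]
    rw [zero_add]
    have hfilters : (List.range i).filter (fun j => cB j = M)
        = lf.filter (fun j => (dp.getD j (0, 0)).1 + 1 = M) := by
      rw [hlf, List.filter_filter]
      apply List.filter_congr
      intro j hj
      by_cases hf : alt_does_fit (bl.getD j []) (bl.getD i [])
      · simp only [hcB, hf, if_true, Bool.and_true]
      · simp only [hcB, hf, Bool.false_eq_true, if_false, Bool.and_false]
        simp only [decide_eq_false_iff_not]
        exact fun h => hM1 h.symm
    rw [hfilters]

lemma alt_inner_fst_pos (bl : List (List Int)) (dp : List (Int × Int)) (i : Nat) :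
    1 ≤ (alt_inner bl dp i).1 := by
  have hB : alt_inner bl dp i
      = ((List.range i).filter (fun j => alt_does_fit (bl.getD j []) (bl.getD i []))).foldl
          (fun p j => if p.1 < (dp.getD j (0, 0)).1 + 1 then ((dp.getD j (0, 0)).1 + 1, (dp.getD j (0, 0)).2)
            else if (dp.getD j (0, 0)).1 + 1 = p.1 then (p.1, p.2 + (dp.getD j (0, 0)).2) else p)
          (1, 1) := by
    rw [alt_inner, List.foldl_filter]
  rw [hB, fold_inv (fun j => (dp.getD j (0, 0)).1 + 1) (fun j => (dp.getD j (0, 0)).2)]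
  exact le_foldl_max_int _ _

lemma foldl_append_const {α β : Type} (c : α) :
    ∀ (l : List β) (acc : List α),
      l.foldl (fun acc _ => acc ++ [c]) acc = acc ++ List.replicate l.length c := by
  intro l
  induction l with
  | nil => intro acc; simp
  | cons x t ih =>
    intro acc
    simp only [List.foldl_cons, ih, List.length_cons]
    rw [show t.length + 1 = 1 + t.length by omega, List.replicate_add]
    simp

lemma set_mid {α : Type} : ∀ (l1 : List α) (x v : α) (l2 : List α),
    (l1 ++ x :: l2).set l1.length v = l1 ++ v :: l2 := by
  intro l1
  induction l1 with
  | nil => intro x v l2; simp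
  | cons y t ih => intro x v l2; simp [ih]

lemma pySetD_mid {α : Type} (l1 : List α) (x v : α) (l2 : List α) :
    PySem.List.pySetD (l1 ++ x :: l2) (l1.length : Int) v = l1 ++ v :: l2 := by
  have hidx : PySem.List.pyIdx? (l1 ++ x :: l2).length (l1.length : Int) = some l1.length := by
    simp [PySem.List.pyIdx?]
  rw [PySem.List.pySetD, PySem.List.pySet?, hidx, Option.map_some, Option.getD_some, set_mid]

-- outer loop: A's in-place-updated max_list is B's dp followed by untouched (0,1) entries
lemma outer_inv (bl : List (List Int)) :
    ∀ (k : Nat), k ≤ bl.length →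
      (List.range k).foldl
          (fun ml (i : Nat) => PySem.List.pySetD ml (i : Int) (pv_helper bl (i : Int) (i : Int) ml []))
          ((List.range bl.length).foldl (fun acc _ => acc ++ [((0 : Int), (1 : Int))]) [])
        = ((List.range k).foldl (fun dp i => dp ++ [alt_inner bl dp i]) [])
            ++ List.replicate (bl.length - k) ((0 : Int), (1 : Int))
      ∧ ((List.range k).foldl (fun dp i => dp ++ [alt_inner bl dp i]) ([] : List (Int × Int))).length = k
      ∧ ∀ p ∈ (List.range k).foldl (fun dp i => dp ++ [alt_inner bl dp i]) ([] : List (Int × Int)), 1 ≤ p.1 := by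
  intro k
  induction k with
  | zero =>
    intro _
    refine ⟨?_, rfl, by simp⟩
    rw [foldl_append_const]
    simp
  | succ k ih =>
    intro hk1
    obtain ⟨hml, hlen, hpos⟩ := ih (by omega)
    set DPk := (List.range k).foldl (fun dp i => dp ++ [alt_inner bl dp i]) ([] : List (Int × Int)) with hDP
    have hrep : List.replicate (bl.length - k) ((0 : Int), (1 : Int))
        = ((0 : Int), (1 : Int)) :: List.replicate (bl.length - (k + 1)) ((0 : Int), (1 : Int)) := by
      rw [show bl.length - k = (bl.length - (k + 1)) + 1 by omega, List.replicate_succ]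
    rw [List.range_succ, List.foldl_append, List.foldl_append, List.foldl_cons, List.foldl_cons,
      List.foldl_nil, List.foldl_nil, hml, hrep, main_step bl DPk _ k hlen hpos]
    have hset := pySetD_mid DPk (((0 : Int), (1 : Int))) (alt_inner bl DPk k)
      (List.replicate (bl.length - (k + 1)) ((0 : Int), (1 : Int)))
    rw [hlen] at hset
    rw [hset]
    refine ⟨by rw [List.append_assoc, List.cons_append, List.nil_append], by simp [← hDP, hlen], ?_⟩
    intro p hp
    rcases List.mem_append.mp hp with h | h
    · exact hpos p h
    · rcases List.mem_singleton.mp h with rfl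
      exact alt_inner_fst_pos _ _ _

lemma max?_map_fst : ∀ (xs : List (Int × Int)) (m : Int × Int),
    (PySem.List.max? (m :: xs) (fun x => x.1)).map Prod.fst
      = PySem.List.max? (m.1 :: xs.map Prod.fst) (fun x => x) := by
  intro xs
  induction xs with
  | nil => intro m; rfl
  | cons y t ih =>
    intro m
    by_cases h : m.1 < y.1
    · rw [show PySem.List.max? (m :: y :: t) (fun x => x.1)
            = PySem.List.max? (y :: t) (fun x => x.1) from by simp [PySem.List.max?, h],
          show PySem.List.max? (m.1 :: (y :: t).map Prod.fst) (fun x => x)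
            = PySem.List.max? (y.1 :: t.map Prod.fst) (fun x => x) from by simp [PySem.List.max?, h]]
      exact ih y
    · rw [show PySem.List.max? (m :: y :: t) (fun x => x.1)
            = PySem.List.max? (m :: t) (fun x => x.1) from by simp [PySem.List.max?, h],
          show PySem.List.max? (m.1 :: (y :: t).map Prod.fst) (fun x => x)
            = PySem.List.max? (m.1 :: t.map Prod.fst) (fun x => x) from by simp [PySem.List.max?, h]]
      exact ih m

lemma idx_filter_sum (mv : Int) : ∀ (l : List (Int × Int)),
    (((List.range l.length).filter (fun k => (l.getD k (0, 1)).1 = mv)).map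
        (fun k => (l.getD k (0, 1)).2)).sum
      = ((l.filter (fun p => p.1 = mv)).map Prod.snd).sum := by
  intro l
  induction l with
  | nil => simp
  | cons p t ih =>
    by_cases h : p.1 = mv <;>
      simp [List.range_succ_eq_map, List.filter_map, List.map_map,
        Function.comp_def, List.getD_eq_getElem?_getD, h] <;>
      · simp only [List.getD_eq_getElem?_getD] at ih
        exact ih
-- ===== VERDICT (by name: the statement is the Claim_ definition above) =====
theorem nesting_boxes_spec : Claim_equal_nesting_boxes := by
  intro bl _ hpre
  obtain ⟨hne, _⟩ := hpre
  unfold Spec_nesting_boxes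
  have hn : 1 ≤ bl.length := List.length_pos_of_ne_nil hne
  obtain ⟨hml, hlen, _⟩ := outer_inv bl bl.length le_rfl
  simp only [Nat.sub_self, List.replicate_zero, List.append_nil] at hml
  simp only [nesting_boxes, nesting_boxes_alt]
  rw [hml]
  have hdpne : (List.range bl.length).foldl (fun dp i => dp ++ [alt_inner bl dp i]) ([] : List (Int × Int)) ≠ [] := by
    intro h
    rw [h] at hlen
    simp at hlen
    omega
  obtain ⟨d0, dt, hcons⟩ := List.exists_cons_of_ne_nil hdpne
  rw [hcons]
  obtain ⟨m, hm⟩ : ∃ m, PySem.List.max? (d0 :: dt) (fun x => x.1) = some m := by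
    cases h : PySem.List.max? (d0 :: dt) (fun x => x.1) with
    | none => exact absurd ((PySem.List.max?_eq_none_iff _ _).mp h) (by simp)
    | some m => exact ⟨m, rfl⟩
  have hfst : PySem.List.max? ((d0 :: dt).map Prod.fst) (fun x => x) = some m.1 := by
    have h1 := max?_map_fst dt d0
    rw [hm, Option.map_some] at h1
    simpa using h1.symm
  rw [hm, hfst, Option.getD_some, Option.getD_some]
  have happ := PySem.List.foldl_append_if (fun k => decide (((d0 :: dt).getD k (0, 1)).1 = m.1))
    (fun k => (k : Int)) (List.range (d0 :: dt).length) ([] : List Int)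
  simp only [decide_eq_true_eq] at happ
  rw [happ, List.nil_append, PySem.List.foldl_add, zero_add, List.map_map]
  simp only [Function.comp_def]
  have hmapg : ∀ k ∈ (List.range (d0 :: dt).length).filter
        (fun k => decide (((d0 :: dt).getD k (0, 1)).1 = m.1)),
      (PySem.List.pyGetD (d0 :: dt) (k : Int) (0, 1)).2 = (fun k => ((d0 :: dt).getD k (0, 1)).2) k := by
    intro k _
    rw [PySem.List.pyGetD_natCast]
  rw [List.map_congr_left hmapg]
  congr 1
  exact idx_filter_sum m.1 (d0 :: dt)
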